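-- pv_equiv track=rewrite | github.com/ricoslaststand/general-life-tasks | services/transaction_service.py | get_transactions_by_payee_id
-- ===== SOURCE A (Python) =====
-- from collections import Counter
--
-- def get_transactions_by_payee_id(payee_id: str, transactions: tuple[str, str]) -> str | None:
--     """
--     Simple categorizer that determines that category of the transaction
--     """
--
--     category_count = Counter(map(lambda x: x[1], transactions))
--
--     categories = []
--     for c in category_count:
--         if c:
--             categories.append((category_count[c], c))
--
--     categories.sort(reverse=True)
--
--     return categories[0][1] if len(categories) else None
-- ===== SOURCE B (Python) =====
-- from collections import Counter
--
--
-- def get_transactions_by_payee_id(payee_id: str, transactions: "tuple[str, str]") -> "str | None":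
--     """
--     Simple categorizer that determines the category of the transaction,
--     by a single running-max scan over the counted categories.
--     """
--     category_count = Counter(map(lambda x: x[1], transactions))
--
--     best = None  # (count, category) of the best non-empty category seen so far
--     for c, n in category_count.items():
--         if c and (best is None or (n, c) > best):
--             best = (n, c)
--
--     return best[1] if best is not None else None
-- ===== Notes on version B (the rewrite author's own statement) =====
-- stated objective: simpler
-- what changed: Instead of collecting a list of (count, category) pairs, sorting it in reverse and taking the head, B keeps a single running best (count, category) pair in one linear scan over the counter's items, skipping falsy categories.
import Mathlib
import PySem

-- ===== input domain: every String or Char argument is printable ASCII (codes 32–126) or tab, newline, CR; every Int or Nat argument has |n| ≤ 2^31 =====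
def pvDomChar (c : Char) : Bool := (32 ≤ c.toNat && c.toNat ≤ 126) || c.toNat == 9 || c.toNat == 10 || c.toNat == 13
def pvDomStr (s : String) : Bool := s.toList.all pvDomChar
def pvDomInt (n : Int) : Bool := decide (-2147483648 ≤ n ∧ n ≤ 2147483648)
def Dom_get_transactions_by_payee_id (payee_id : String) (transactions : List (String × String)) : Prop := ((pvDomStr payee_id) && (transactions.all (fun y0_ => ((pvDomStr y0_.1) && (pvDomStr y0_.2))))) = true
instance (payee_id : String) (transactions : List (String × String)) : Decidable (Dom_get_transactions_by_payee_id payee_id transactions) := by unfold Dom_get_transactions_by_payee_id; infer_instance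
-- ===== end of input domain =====

-- B replaces A's collect-then-sort-reverse-then-take-head by a single running-max scan over
-- the counter's items (same value, including the descending (count, category) tie-break).

-- ===== PORT A =====
def get_transactions_by_payee_id (payee_id : String) (transactions : List (String × String)) : Option String :=
  let category_count := PySem.Dict.counter (transactions.map (fun x => x.2))
  let categories : List (Int × String) :=
    category_count.keys.foldl (fun acc c =>
      if c ≠ "" then acc ++ [(category_count.getD c 0, c)] else acc) []
  let sortedCats := PySem.List.sorted2 categories Prod.fst Prod.snd true
  match sortedCats.head? with
  | some p => some p.2
  | none => none

-- ===== PORT B =====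
def get_transactions_by_payee_id_alt (payee_id : String) (transactions : List (String × String)) : Option String :=
  let category_count := PySem.Dict.counter (transactions.map (fun x => x.2))
  let best := category_count.items.foldl (fun best p =>
    match best with
    | none => if p.1 ≠ "" then some (p.2, p.1) else none
    | some b =>
      if p.1 ≠ "" ∧ (b.1 < p.2 ∨ (b.1 = p.2 ∧ b.2 < p.1)) then some (p.2, p.1) else some b)
    (none : Option (Int × String))
  match best with
  | some b => some b.2
  | none => none

-- ===== PRECONDITION & SPEC =====
def Spec_get_transactions_by_payee_id (payee_id : String) (transactions : List (String × String)) (out : Option String) : Prop := out = get_transactions_by_payee_id_alt payee_id transactions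
instance (payee_id : String) (transactions : List (String × String)) (out : Option String) : Decidable (Spec_get_transactions_by_payee_id payee_id transactions out) := by unfold Spec_get_transactions_by_payee_id; infer_instance

-- ===== CLAIM (what is proved, stated in full; the proofs are below) =====
def Claim_equal_get_transactions_by_payee_id : Prop := ∀ (payee_id : String) (transactions : List (String × String)), Dom_get_transactions_by_payee_id payee_id transactions → Spec_get_transactions_by_payee_id payee_id transactions (get_transactions_by_payee_id payee_id transactions)

-- ===== LEMMAS AND PROOFS =====

-- how one insertBy step changes the head of the accumulator, read as a running-max step
def pvMaxStep {α : Type} (before : α → α → Bool) (h : Option α) (x : α) : Option α :=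
  match h with
  | none => some x
  | some y => if before x y then some x else some y

-- the comparator sorted2 (reverse=True) inserts with: x goes in front of y iff y <lex x
def pvBef (a b : Int × String) : Bool :=
  decide (b.1 < a.1) || (!decide (a.1 < b.1) && decide (b.2 < a.2))

theorem pv_head?_insertBy {α : Type} (before : α → α → Bool) (x : α) (ys : List α) :
    (PySem.List.insertBy before x ys).head? = pvMaxStep before ys.head? x := by
  cases ys with
  | nil => rfl
  | cons y t =>
    simp only [PySem.List.insertBy, pvMaxStep, List.head?_cons]
    split_ifs <;> simp

theorem pv_head?_foldl_insertBy {α : Type} (before : α → α → Bool) (l : List α) (acc : List α) :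
    (l.foldl (fun a x => PySem.List.insertBy before x a) acc).head? =
      l.foldl (pvMaxStep before) acc.head? := by
  induction l generalizing acc with
  | nil => rfl
  | cons x t ih =>
    simp only [List.foldl_cons]
    rw [ih, pv_head?_insertBy]

-- the head of the reverse-sorted list IS the running lexicographic maximum (first maximum kept)
theorem pv_head?_sorted2 (l : List (Int × String)) :
    (PySem.List.sorted2 l Prod.fst Prod.snd true).head? = l.foldl (pvMaxStep pvBef) none := by
  have h : PySem.List.sorted2 l Prod.fst Prod.snd true
      = l.foldl (fun a x => PySem.List.insertBy pvBef x a) [] := rfl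
  rw [h, pv_head?_foldl_insertBy]
  rfl

-- B's loop body over a counter item (k, n) is the filtered running-max step on the pair (n, k)
theorem pv_step_eq (n : Int) (best : Option (Int × String)) (k : String) :
    (match best with
      | none => if (k, n).1 ≠ "" then some ((k, n).2, (k, n).1) else none
      | some b =>
        if (k, n).1 ≠ "" ∧ (b.1 < (k, n).2 ∨ (b.1 = (k, n).2 ∧ b.2 < (k, n).1))
        then some ((k, n).2, (k, n).1) else some b)
    = if k ≠ "" then pvMaxStep pvBef best (n, k) else best := by
  cases best with
  | none => by_cases hk : k = "" <;> simp [hk, pvMaxStep]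
  | some b =>
    by_cases hk : k = "" <;> simp only [pvMaxStep, pvBef, hk] <;> simp [hk]
    have hiff : (b.1 < n ∨ b.1 = n ∧ b.2.toList < k.toList) ↔ (b.1 < n ∨ b.1 ≤ n ∧ b.2.toList < k.toList) := by
      constructor
      · rintro (h | ⟨h1, h2⟩)
        · exact Or.inl h
        · exact Or.inr ⟨le_of_eq h1, h2⟩
      · rintro (h | ⟨h1, h2⟩)
        · exact Or.inl h
        · rcases eq_or_lt_of_le h1 with h3 | h3
          · exact Or.inr ⟨h3, h2⟩
          · exact Or.inl h3
    simp [hiff]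

-- ===== VERDICT (by name: the statement is the Claim_ definition above) =====
theorem get_transactions_by_payee_id_spec : Claim_equal_get_transactions_by_payee_id := by
  intro payee_id transactions _
  unfold Spec_get_transactions_by_payee_id
  simp only [get_transactions_by_payee_id, get_transactions_by_payee_id_alt,
    PySem.Dict.keys_counter, PySem.Dict.items_counter, PySem.Dict.getD_counter]
  rw [PySem.List.foldl_append_ite (p := fun c => c ≠ "")
      (f := fun c => (((transactions.map (fun x => x.2)).count c : Int), c))]
  rw [pv_head?_sorted2, List.nil_append, List.foldl_map, List.foldl_map]
  rw [PySem.List.foldl_congr_mem _ _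
      (fun best k => if k ≠ "" then pvMaxStep pvBef best (((transactions.map (fun x => x.2)).count k : Int), k) else best)
      none (fun acc x _ => pv_step_eq _ acc x)]
  rw [PySem.List.foldl_ite_eq_foldl_filter (p := fun k => k ≠ "")]
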